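-- pv_equiv track=rewrite | github.com/jiangyanzhe853/IBI1_2025-26 | Practical_7/stop_codons.py | find_in_frame_stop_codons
-- ===== SOURCE A (Python) =====
-- stop_codons = ['TAA', 'TAG', 'TGA']
--
-- def find_in_frame_stop_codons(sequence):
--     """
--     Identify which stop codons are present in-frame
--     in an ORF beginning with ATG.
--     """
--
--     found_stop_codons = set()
--
--     # Search for all possible ATG start codons
--     for i in range(len(sequence) - 2):
--
--         if sequence[i:i + 3] == 'ATG':
--
--             # Move in-frame from the ATG codon
--             for j in range(i + 3, len(sequence) - 2, 3):
--                 codon = sequence[j:j + 3]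
--
--                 if codon in stop_codons:
--                     found_stop_codons.add(codon)
--                     break
--
--     return sorted(found_stop_codons)
-- ===== SOURCE B (Python) =====
-- stop_codons = ['TAA', 'TAG', 'TGA']
--
-- def find_in_frame_stop_codons(sequence):
--     """
--     Identify which stop codons are present in-frame
--     in an ORF beginning with ATG.
--     """
--     n = len(sequence)
--     found = set()
--     # One forward pass per reading frame: remember whether an ATG is open;
--     # the first stop codon after any open ATG is exactly that ATG's in-frame stop.
--     for f in range(3):
--         has_atg = False
--         for p in range(f, n - 2, 3):
--             codon = sequence[p:p + 3]
--             if codon == 'ATG':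
--                 has_atg = True
--             elif has_atg and codon in stop_codons:
--                 found.add(codon)
--                 has_atg = False
--     return sorted(found)
-- ===== Notes on version B (the rewrite author's own statement) =====
-- stated objective: alternative
-- what changed: Replaces A's per-ATG inner rescan for the next in-frame stop codon by a single forward pass per reading frame that keeps an open-ATG flag and records each first stop codon as it is passed; A rescans forward from every ATG (quadratic when starts are dense), B reads each position once per frame.
import Mathlib
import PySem

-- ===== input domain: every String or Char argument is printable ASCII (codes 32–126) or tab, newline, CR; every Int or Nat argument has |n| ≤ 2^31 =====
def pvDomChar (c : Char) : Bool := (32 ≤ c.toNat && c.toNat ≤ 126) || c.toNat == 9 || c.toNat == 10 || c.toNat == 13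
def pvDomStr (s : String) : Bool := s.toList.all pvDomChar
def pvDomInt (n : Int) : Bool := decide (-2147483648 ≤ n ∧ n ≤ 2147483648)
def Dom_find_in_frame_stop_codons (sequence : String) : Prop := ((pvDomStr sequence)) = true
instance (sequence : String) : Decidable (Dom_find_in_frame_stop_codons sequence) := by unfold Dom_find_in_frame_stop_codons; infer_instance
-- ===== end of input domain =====

-- B replaces A's per-ATG inner rescan by one forward pass per reading frame with an
-- open-ATG flag, reading each position once per frame instead of once per preceding ATG.

-- ===== PORT A =====
def stop_codons : List String := ["TAA", "TAG", "TGA"]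

-- A's inner 'for j in range(i+3, len-2, 3)' with its break: recursion that stops at the first stop codon
def pvInnerA (sequence : String) (js : List Int) (found : PySem.Set String) : PySem.Set String :=
  match js with
  | [] => found
  | j :: rest =>
    let codon := PySem.Str.slice sequence (some j) (some (j + 3))
    if codon ∈ stop_codons then PySem.Set.add found codon
    else pvInnerA sequence rest found

def find_in_frame_stop_codons (sequence : String) : List String :=
  let found : PySem.Set String :=
    (PySem.List.pyRange 0 (PySem.Str.len sequence - 2) 1).foldl
      (fun found i =>
        if PySem.Str.slice sequence (some i) (some (i + 3)) = "ATG" then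
          pvInnerA sequence (PySem.List.pyRange (i + 3) (PySem.Str.len sequence - 2) 3) found
        else found)
      PySem.Set.empty
  PySem.List.sorted found (fun x => x) false

-- ===== PORT B =====
def find_in_frame_stop_codons_alt (sequence : String) : List String :=
  let found : PySem.Set String :=
    (PySem.List.pyRange 0 3 1).foldl
      (fun found f =>
        ((PySem.List.pyRange f (PySem.Str.len sequence - 2) 3).foldl
          (fun (st : PySem.Set String × Bool) p =>
            let codon := PySem.Str.slice sequence (some p) (some (p + 3))
            if codon = "ATG" then (st.1, true)
            else if st.2 ∧ codon ∈ stop_codons then (PySem.Set.add st.1 codon, false)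
            else st)
          (found, false)).1)
      PySem.Set.empty
  PySem.List.sorted found (fun x => x) false

-- ===== PRECONDITION & SPEC =====
def Spec_find_in_frame_stop_codons (sequence : String) (out : List String) : Prop := out = find_in_frame_stop_codons_alt sequence
instance (sequence : String) (out : List String) : Decidable (Spec_find_in_frame_stop_codons sequence out) := by unfold Spec_find_in_frame_stop_codons; infer_instance

-- ===== CLAIM (what is proved, stated in full; the proofs are below) =====
def Claim_equal_find_in_frame_stop_codons : Prop := ∀ (sequence : String), Dom_find_in_frame_stop_codons sequence → Spec_find_in_frame_stop_codons sequence (find_in_frame_stop_codons sequence)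

-- ===== LEMMAS AND PROOFS =====

-- the codon read at position j
def pvCod (s : String) (j : Int) : String := PySem.Str.slice s (some j) (some (j + 3))

-- first in-frame stop codon read at a position q ≥ j, q ≡ j (mod 3), q < b
def pvFS (s : String) (b j : Int) : Option String :=
  if _h : j < b then
    if pvCod s j ∈ stop_codons then some (pvCod s j) else pvFS s b (j + 3)
  else none
termination_by (b - j).toNat
decreasing_by omega

-- the stop codons B's frame scan records from position j on, with flag h
def pvW (s : String) (b j : Int) (h : Bool) (c : String) : Prop :=
  if _h : j < b then
    if pvCod s j = "ATG" then pvW s b (j + 3) true c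
    else if pvCod s j ∈ stop_codons then
      (if h then (pvCod s j = c ∨ pvW s b (j + 3) false c) else pvW s b (j + 3) false c)
    else pvW s b (j + 3) h c
  else False
termination_by (b - j).toNat
decreasing_by all_goals omega

lemma pyRange3_nil {j b : Int} (h : b ≤ j) : PySem.List.pyRange j b 3 = [] := by
  rw [PySem.List.pyRange_of_pos _ _ (by norm_num)]
  have : ¬ (j < b) := by omega
  simp [this]

lemma pyRange3_cons {j b : Int} (h : j < b) :
    PySem.List.pyRange j b 3 = j :: PySem.List.pyRange (j + 3) b 3 := by
  rw [PySem.List.pyRange_of_pos _ _ (by norm_num), PySem.List.pyRange_of_pos _ _ (by norm_num)]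
  have hcnt : (if j < b then ((b - j + 3 - 1)/3).toNat else 0)
      = (if j + 3 < b then ((b - (j+3) + 3 - 1)/3).toNat else 0) + 1 := by
    split_ifs <;> omega
  rw [hcnt]
  apply List.ext_getElem
  · simp
  · intro i h1 h2
    simp only [List.getElem_map, List.getElem_range, List.getElem_cons]
    split
    · omega
    · omega

-- A's inner loop adds exactly the first in-frame stop codon, if any
lemma innerA_eq (s : String) (b : Int) : ∀ j found,
    pvInnerA s (PySem.List.pyRange j b 3) found =
      (match pvFS s b j with
       | some c => PySem.Set.add found c
       | none => found) := by
  have main : ∀ (m : Nat) j found, (b - j).toNat = m →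
      pvInnerA s (PySem.List.pyRange j b 3) found =
        (match pvFS s b j with
         | some c => PySem.Set.add found c
         | none => found) := by
    intro m
    induction m using Nat.strong_induction_on with
    | _ m IH =>
      intro j found hm
      by_cases h : j < b
      · rw [pyRange3_cons h, pvFS]
        by_cases hc : pvCod s j ∈ stop_codons
        · simp only [pvInnerA, pvCod] at *
          simp [h, hc]
        · simp only [pvInnerA, pvCod] at *
          simp only [h, dif_pos, hc, if_false]
          exact IH (b - (j + 3)).toNat (by omega) (j + 3) found rfl
      · rw [pyRange3_nil (by omega), pvFS]
        simp [h, pvInnerA]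
  intro j found
  exact main (b - j).toNat j found rfl

-- membership through a set-accumulating foldl whose step adds per-element facts
lemma mem_foldl_iff {α : Type} (f : PySem.Set String → α → PySem.Set String) (P : α → Prop) (c : String)
    (hstep : ∀ init x, c ∈ f init x ↔ c ∈ init ∨ P x) :
    ∀ (l : List α) (init : PySem.Set String), c ∈ l.foldl f init ↔ c ∈ init ∨ ∃ x ∈ l, P x := by
  intro l
  induction l with
  | nil => simp
  | cons a l ih =>
    intro init
    rw [List.foldl_cons, ih, hstep]
    simp only [List.exists_mem_cons_iff]
    tauto

lemma nodup_foldl {α : Type} (f : PySem.Set String → α → PySem.Set String)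
    (hstep : ∀ init x, init.Nodup → (f init x).Nodup) :
    ∀ (l : List α) (init : PySem.Set String), init.Nodup → (l.foldl f init).Nodup := by
  intro l
  induction l with
  | nil => exact fun init h => h
  | cons a l ih => exact fun init h => ih _ (hstep init a h)

-- A's outer step
lemma stepA_mem (s : String) (b : Int) (c : String) (init : PySem.Set String) (i : Int) :
    (c ∈ (if PySem.Str.slice s (some i) (some (i + 3)) = "ATG" then
            pvInnerA s (PySem.List.pyRange (i + 3) b 3) init
          else init))
    ↔ (c ∈ init ∨ (pvCod s i = "ATG" ∧ pvFS s b (i + 3) = some c)) := by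
  by_cases h : pvCod s i = "ATG"
  · simp only [pvCod] at h
    rw [if_pos h, innerA_eq]
    cases hfs : pvFS s b (i + 3) with
    | none => simp [pvCod, h]
    | some a =>
      simp only [PySem.Set.mem_add, pvCod, h, true_and, Option.some.injEq]
      constructor
      · rintro (hm | rfl)
        · exact Or.inl hm
        · exact Or.inr rfl
      · rintro (hm | rfl)
        · exact Or.inl hm
        · exact Or.inr rfl
  · simp only [pvCod] at h
    rw [if_neg h]
    simp [pvCod, h]

lemma stepA_nodup (s : String) (b : Int) (init : PySem.Set String) (i : Int) (hn : init.Nodup) :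
    ((if PySem.Str.slice s (some i) (some (i + 3)) = "ATG" then
        pvInnerA s (PySem.List.pyRange (i + 3) b 3) init
      else init)).Nodup := by
  split
  · rw [innerA_eq]
    cases pvFS s b (i + 3) with
    | none => exact hn
    | some a => exact PySem.Set.nodup_add _ _ hn
  · exact hn

-- B's frame scan: membership
lemma memFrameB (s : String) (b : Int) (c : String) : ∀ (j : Int) (found : PySem.Set String) (h : Bool),
    (c ∈ ((PySem.List.pyRange j b 3).foldl
          (fun (st : PySem.Set String × Bool) p =>
            let codon := PySem.Str.slice s (some p) (some (p + 3))
            if codon = "ATG" then (st.1, true)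
            else if st.2 ∧ codon ∈ stop_codons then (PySem.Set.add st.1 codon, false)
            else st)
          (found, h)).1)
    ↔ (c ∈ found ∨ pvW s b j h c) := by
  have main : ∀ (m : Nat) (j : Int) (found : PySem.Set String) (h : Bool), (b - j).toNat = m →
      ((c ∈ ((PySem.List.pyRange j b 3).foldl
          (fun (st : PySem.Set String × Bool) p =>
            let codon := PySem.Str.slice s (some p) (some (p + 3))
            if codon = "ATG" then (st.1, true)
            else if st.2 ∧ codon ∈ stop_codons then (PySem.Set.add st.1 codon, false)
            else st)
          (found, h)).1)
      ↔ (c ∈ found ∨ pvW s b j h c)) := by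
    intro m
    induction m using Nat.strong_induction_on with
    | _ m IH =>
      intro j found h hm
      by_cases hj : j < b
      · rw [pyRange3_cons hj, List.foldl_cons, pvW]
        by_cases hA : pvCod s j = "ATG"
        · simp only [pvCod] at hA
          simp only [hA, if_pos, hj, dif_pos, pvCod]
          exact IH (b - (j + 3)).toNat (by omega) (j + 3) found true rfl
        · by_cases hS : pvCod s j ∈ stop_codons
          · cases h with
            | true =>
              simp only [pvCod] at hA hS
              simp only [hA, hS, hj, dif_pos, if_false, pvCod, and_true, if_true]
              rw [IH (b - (j + 3)).toNat (by omega) (j + 3) _ false rfl]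
              simp only [PySem.Set.mem_add]
              constructor
              · rintro ((hm1 | rfl) | hw)
                · exact Or.inl hm1
                · exact Or.inr (Or.inl rfl)
                · exact Or.inr (Or.inr hw)
              · rintro (hm1 | (rfl | hw))
                · exact Or.inl (Or.inl hm1)
                · exact Or.inl (Or.inr rfl)
                · exact Or.inr hw
            | false =>
              simp only [pvCod] at hA hS
              simp only [hA, hS, hj, dif_pos, if_false, pvCod, Bool.false_eq_true, and_true, if_true]
              exact IH (b - (j + 3)).toNat (by omega) (j + 3) found false rfl
          · simp only [pvCod] at hA hS
            simp only [hA, hS, hj, dif_pos, if_false, pvCod, and_false]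
            exact IH (b - (j + 3)).toNat (by omega) (j + 3) found h rfl
      · rw [pyRange3_nil (by omega), pvW]
        simp [hj]
  intro j found h
  exact main (b - j).toNat j found h rfl

lemma nodupFrameB (s : String) (b : Int) : ∀ (j : Int) (found : PySem.Set String) (h : Bool), found.Nodup →
    (((PySem.List.pyRange j b 3).foldl
          (fun (st : PySem.Set String × Bool) p =>
            let codon := PySem.Str.slice s (some p) (some (p + 3))
            if codon = "ATG" then (st.1, true)
            else if st.2 ∧ codon ∈ stop_codons then (PySem.Set.add st.1 codon, false)
            else st)
          (found, h)).1).Nodup := by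
  have main : ∀ (m : Nat) (j : Int) (found : PySem.Set String) (h : Bool), (b - j).toNat = m → found.Nodup →
      ((((PySem.List.pyRange j b 3).foldl
          (fun (st : PySem.Set String × Bool) p =>
            let codon := PySem.Str.slice s (some p) (some (p + 3))
            if codon = "ATG" then (st.1, true)
            else if st.2 ∧ codon ∈ stop_codons then (PySem.Set.add st.1 codon, false)
            else st)
          (found, h)).1).Nodup) := by
    intro m
    induction m using Nat.strong_induction_on with
    | _ m IH =>
      intro j found h hm hn
      by_cases hj : j < b
      · rw [pyRange3_cons hj, List.foldl_cons]
        dsimp only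
        split
        · exact IH (b - (j + 3)).toNat (by omega) (j + 3) found true rfl hn
        · split
          · exact IH (b - (j + 3)).toNat (by omega) (j + 3) _ false rfl (PySem.Set.nodup_add _ _ hn)
          · exact IH (b - (j + 3)).toNat (by omega) (j + 3) found h rfl hn
      · rw [pyRange3_nil (by omega)]
        exact hn
  intro j found h hn
  exact main (b - j).toNat j found h rfl hn

-- the crux: B's frame contributions from j with flag h are exactly
-- "h is set and the next stop is c" or "some later ATG at i ≡ j (mod 3) whose first stop is c"
lemma W_iff (s : String) (b : Int) (c : String) : ∀ (j : Int) (h : Bool),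
    pvW s b j h c ↔
      ((h = true ∧ pvFS s b j = some c) ∨
       ∃ i, j ≤ i ∧ i < b ∧ (i - j) % 3 = 0 ∧ pvCod s i = "ATG" ∧ pvFS s b (i + 3) = some c) := by
  have main : ∀ (m : Nat) (j : Int) (h : Bool), (b - j).toNat = m →
      (pvW s b j h c ↔
        ((h = true ∧ pvFS s b j = some c) ∨
         ∃ i, j ≤ i ∧ i < b ∧ (i - j) % 3 = 0 ∧ pvCod s i = "ATG" ∧ pvFS s b (i + 3) = some c)) := by
    intro m
    induction m using Nat.strong_induction_on with
    | _ m IH =>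
      intro j h hm
      by_cases hj : j < b
      · rw [pvW, pvFS]
        by_cases hA : pvCod s j = "ATG"
        · have hS : pvCod s j ∉ stop_codons := by
            rw [hA]; decide
          simp only [hj, dif_pos, hA, reduceIte]
          rw [IH (b - (j + 3)).toNat (by omega) (j + 3) true rfl]
          constructor
          · rintro (⟨-, hfs⟩ | ⟨i, hi1, hi2, hi3, hi4, hi5⟩)
            · exact Or.inr ⟨j, by omega, hj, by omega, hA, hfs⟩
            · exact Or.inr ⟨i, by omega, hi2, by omega, hi4, hi5⟩
          · rintro (⟨-, hfs⟩ | ⟨i, hi1, hi2, hi3, hi4, hi5⟩)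
            · exact Or.inl ⟨rfl, hfs⟩
            · by_cases hij : i = j
              · subst hij
                exact Or.inl ⟨rfl, hi5⟩
              · exact Or.inr ⟨i, by omega, hi2, by omega, hi4, hi5⟩
        · by_cases hS : pvCod s j ∈ stop_codons
          · simp only [hj, dif_pos, hA, hS, if_pos, reduceIte]
            cases h with
            | true =>
              simp only [if_true]
              rw [IH (b - (j + 3)).toNat (by omega) (j + 3) false rfl]
              constructor
              · rintro (rfl | (⟨hfalse, -⟩ | ⟨i, hi1, hi2, hi3, hi4, hi5⟩))
                · exact Or.inl ⟨trivial, rfl⟩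
                · exact absurd hfalse (by simp)
                · exact Or.inr ⟨i, by omega, hi2, by omega, hi4, hi5⟩
              · rintro (⟨-, hfs⟩ | ⟨i, hi1, hi2, hi3, hi4, hi5⟩)
                · exact Or.inl (Option.some.inj hfs)
                · by_cases hij : i = j
                  · subst hij; exact absurd hi4 hA
                  · exact Or.inr (Or.inr ⟨i, by omega, hi2, by omega, hi4, hi5⟩)
            | false =>
              simp only [Bool.false_eq_true, if_false]
              rw [IH (b - (j + 3)).toNat (by omega) (j + 3) false rfl]
              constructor
              · rintro (⟨hfalse, -⟩ | ⟨i, hi1, hi2, hi3, hi4, hi5⟩)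
                · exact absurd hfalse (by simp)
                · exact Or.inr ⟨i, by omega, hi2, by omega, hi4, hi5⟩
              · rintro (⟨hfalse, -⟩ | ⟨i, hi1, hi2, hi3, hi4, hi5⟩)
                · exact absurd hfalse (by simp)
                · by_cases hij : i = j
                  · subst hij; exact absurd hi4 hA
                  · exact Or.inr ⟨i, by omega, hi2, by omega, hi4, hi5⟩
          · simp only [hj, dif_pos, hA, hS, if_false]
            rw [IH (b - (j + 3)).toNat (by omega) (j + 3) h rfl]
            constructor
            · rintro (⟨hh, hfs⟩ | ⟨i, hi1, hi2, hi3, hi4, hi5⟩)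
              · exact Or.inl ⟨hh, hfs⟩
              · exact Or.inr ⟨i, by omega, hi2, by omega, hi4, hi5⟩
            · rintro (⟨hh, hfs⟩ | ⟨i, hi1, hi2, hi3, hi4, hi5⟩)
              · exact Or.inl ⟨hh, hfs⟩
              · by_cases hij : i = j
                · subst hij; exact absurd hi4 hA
                · exact Or.inr ⟨i, by omega, hi2, by omega, hi4, hi5⟩
      · rw [pvW, pvFS]
        simp only [dif_neg hj]
        constructor
        · exact fun hfalse => absurd hfalse (by simp)
        · rintro (⟨-, hfs⟩ | ⟨i, hi1, hi2, -⟩)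
          · exact absurd hfs (by simp)
          · omega
  intro j h
  exact main (b - j).toNat j h rfl

-- ===== VERDICT (by name: the statement is the Claim_ definition above) =====
theorem find_in_frame_stop_codons_spec : Claim_equal_find_in_frame_stop_codons := by
  intro s _
  unfold Spec_find_in_frame_stop_codons find_in_frame_stop_codons find_in_frame_stop_codons_alt
  dsimp only
  set b : Int := PySem.Str.len s - 2 with hb
  apply PySem.List.sorted_eq_sorted_of_perm _ _ _ (fun _ _ h => h)
  rw [List.perm_ext_iff_of_nodup]
  · intro c
    rw [mem_foldl_iff _ (fun i => pvCod s i = "ATG" ∧ pvFS s b (i + 3) = some c) c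
          (stepA_mem s b c),
        mem_foldl_iff _ (fun f => pvW s b f false c) c (fun init f => memFrameB s b c f init false)]
    simp only [PySem.List.mem_pyRange_one]
    constructor
    · rintro (hfalse | ⟨i, ⟨hi0, hib⟩, hATG, hfs⟩)
      · exact absurd hfalse (by simp [PySem.Set.empty])
      · refine Or.inr ⟨i % 3, ⟨by omega, by omega⟩, ?_⟩
        rw [W_iff]
        exact Or.inr ⟨i, by omega, hib, by omega, hATG, hfs⟩
    · rintro (hfalse | ⟨f, ⟨hf0, hf3⟩, hw⟩)
      · exact absurd hfalse (by simp [PySem.Set.empty])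
      · rw [W_iff] at hw
        rcases hw with ⟨hfalse, -⟩ | ⟨i, hi1, hi2, -, hATG, hfs⟩
        · exact absurd hfalse (by simp)
        · exact Or.inr ⟨i, ⟨by omega, hi2⟩, hATG, hfs⟩
  · exact nodup_foldl _ (stepA_nodup s b) _ _ List.nodup_nil
  · exact nodup_foldl _ (fun init f hn => nodupFrameB s b f init false hn) _ _ List.nodup_nil
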